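-- pv_equiv track=rewrite | github.com/NguyenTinh98/NER_MOCKPROJECT | LoiLN/utils.py | word_to_sequences
-- ===== SOURCE A (Python) =====
-- def word_to_sequences(data):
--     """
--     Transfer [(word, tag),...,[word,tag]] format to list words and list tags
--
--     Argument:
--     --data: [(word, tag),...,[word,tag]] format
--
--     Return:
--     --x: sentences
--     --y: labels
--     """
--     X = []
--     Y = []
--     for line in data:
--         x = [word for word, tag in line]
--         y = [tag for word, tag in line]
--         X.append(x.copy())
--         x.clear()
--         Y.append(y.copy())
--         y.clear()
--     return X, Y
-- ===== SOURCE B (Python) =====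
-- def word_to_sequences(data):
--     # CSR-style: one flat pass collecting all words/tags plus an offset table,
--     # then rebuild each sentence by slicing the flat arrays.
--     flat_w = []
--     flat_t = []
--     offsets = [0]
--     for line in data:
--         for w, t in line:
--             flat_w.append(w)
--             flat_t.append(t)
--         offsets.append(len(flat_w))
--     X = [flat_w[offsets[i]:offsets[i + 1]] for i in range(len(data))]
--     Y = [flat_t[offsets[i]:offsets[i + 1]] for i in range(len(data))]
--     return X, Y
-- ===== Notes on version B (the rewrite author's own statement) =====
-- stated objective: alternative
-- what changed: B replaces A's per-line pair of comprehensions with a CSR-style columnar layout: one flat pass fills two global flat arrays plus an offset table, and each sentence is then reconstructed by slicing the flat arrays at the recorded offsets.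
import Mathlib
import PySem

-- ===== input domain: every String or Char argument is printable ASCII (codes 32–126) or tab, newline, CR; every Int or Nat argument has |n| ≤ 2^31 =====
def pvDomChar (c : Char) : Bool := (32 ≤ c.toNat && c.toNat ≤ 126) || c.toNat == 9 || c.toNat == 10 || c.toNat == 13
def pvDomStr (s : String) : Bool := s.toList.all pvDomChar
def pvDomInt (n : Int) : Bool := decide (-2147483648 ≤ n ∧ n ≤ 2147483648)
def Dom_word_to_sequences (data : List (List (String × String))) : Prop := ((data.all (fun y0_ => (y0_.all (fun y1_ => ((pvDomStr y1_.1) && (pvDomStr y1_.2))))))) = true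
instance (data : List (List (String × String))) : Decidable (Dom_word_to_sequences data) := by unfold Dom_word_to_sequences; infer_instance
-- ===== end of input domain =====

-- B flattens all pairs into two flat arrays plus an offset table and rebuilds each line by slicing (CSR layout); alternative algorithm, same cost.

-- ===== PORT A =====
-- loop over data, building the word and tag comprehensions of each line and appending
-- (x.copy()/x.clear() just append the freshly built list; the appended value is x itself)
def word_to_sequences (data : List (List (String × String))) : List (List String) × List (List String) :=
  data.foldl
    (fun (acc : List (List String) × List (List String)) line =>
      let x := line.map (fun wt => wt.1)
      let y := line.map (fun wt => wt.2)
      (acc.1 ++ [x], acc.2 ++ [y]))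
    ([], [])

-- ===== PORT B =====
-- one flat pass: append every word/tag to flat arrays, record len(flat_w) after each line;
-- then X/Y are slices of the flat arrays at consecutive offsets
def word_to_sequences_alt (data : List (List (String × String))) : List (List String) × List (List String) :=
  let st := data.foldl
    (fun (acc : List String × List String × List Int) line =>
      let p := line.foldl
        (fun (q : List String × List String) wt => (q.1 ++ [wt.1], q.2 ++ [wt.2]))
        (acc.1, acc.2.1)
      (p.1, p.2, acc.2.2 ++ [PySem.List.len p.1]))
    ([], [], [(0 : Int)])
  let flatW := st.1
  let flatT := st.2.1
  let offsets := st.2.2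
  let X := (PySem.List.pyRange 0 (PySem.List.len data) 1).map
    (fun i => PySem.List.slice flatW (some (PySem.List.pyGetD offsets i 0)) (some (PySem.List.pyGetD offsets (i + 1) 0)))
  let Y := (PySem.List.pyRange 0 (PySem.List.len data) 1).map
    (fun i => PySem.List.slice flatT (some (PySem.List.pyGetD offsets i 0)) (some (PySem.List.pyGetD offsets (i + 1) 0)))
  (X, Y)

-- ===== PRECONDITION & SPEC =====
def Spec_word_to_sequences (data : List (List (String × String))) (out : List (List String) × List (List String)) : Prop := out = word_to_sequences_alt data
instance (data : List (List (String × String))) (out : List (List String) × List (List String)) : Decidable (Spec_word_to_sequences data out) := by unfold Spec_word_to_sequences; infer_instance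

-- ===== CLAIM (what is proved, stated in full; the proofs are below) =====
def Claim_equal_word_to_sequences : Prop := ∀ (data : List (List (String × String))), Dom_word_to_sequences data → Spec_word_to_sequences data (word_to_sequences data)

-- ===== LEMMAS AND PROOFS =====

-- A's fold appends the two per-line maps
theorem wtsA_foldl_eq (data : List (List (String × String))) (X Y : List (List String)) :
    data.foldl
      (fun (acc : List (List String) × List (List String)) line =>
        let x := line.map (fun wt => wt.1)
        let y := line.map (fun wt => wt.2)
        (acc.1 ++ [x], acc.2 ++ [y]))
      (X, Y)
    = (X ++ data.map (fun line => line.map (fun wt => wt.1)),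
       Y ++ data.map (fun line => line.map (fun wt => wt.2))) := by
  induction data generalizing X Y with
  | nil => simp
  | cons h t ih => simp [ih]

-- B's inner per-line fold appends the two column maps
theorem wtsB_inner_eq (line : List (String × String)) (a b : List String) :
    line.foldl
      (fun (q : List String × List String) wt => (q.1 ++ [wt.1], q.2 ++ [wt.2]))
      (a, b)
    = (a ++ line.map (fun wt => wt.1), b ++ line.map (fun wt => wt.2)) := by
  induction line generalizing a b with
  | nil => simp
  | cons h t ih => simp [ih]

-- B's outer step with the inner fold replaced by its value
def wtsStep (acc : List String × List String × List Int) (line : List (String × String)) :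
    List String × List String × List Int :=
  (acc.1 ++ line.map (fun wt => wt.1), acc.2.1 ++ line.map (fun wt => wt.2),
   acc.2.2 ++ [PySem.List.len (acc.1 ++ line.map (fun wt => wt.1))])

theorem wtsStep_eq :
    (fun (acc : List String × List String × List Int) (line : List (String × String)) =>
      let p := line.foldl
        (fun (q : List String × List String) wt => (q.1 ++ [wt.1], q.2 ++ [wt.2]))
        (acc.1, acc.2.1)
      (p.1, p.2, acc.2.2 ++ [PySem.List.len p.1]))
    = wtsStep := by
  funext acc line
  simp [wtsB_inner_eq, wtsStep]

-- the offsets of the prefixes of data (lengths of flattened word-prefixes), as Ints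
def wtsOff (data : List (List (String × String))) (k : Nat) : Int :=
  (((data.take k).flatMap (fun line => line.map (fun wt => wt.1))).length : Int)

theorem wtsOff_prefix (u v : List (List (String × String))) (k : Nat) (hk : k ≤ u.length) :
    wtsOff (u ++ v) k = wtsOff u k := by
  simp [wtsOff, List.take_append_of_le_length hk]

-- B's outer fold computes the two flat column arrays and the offset table
theorem wtsB_outer_eq (t pre : List (List (String × String))) :
    t.foldl wtsStep
      (pre.flatMap (fun line => line.map (fun wt => wt.1)),
       pre.flatMap (fun line => line.map (fun wt => wt.2)),
       (List.range (pre.length + 1)).map (wtsOff pre))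
    = ((pre ++ t).flatMap (fun line => line.map (fun wt => wt.1)),
       (pre ++ t).flatMap (fun line => line.map (fun wt => wt.2)),
       (List.range ((pre ++ t).length + 1)).map (wtsOff (pre ++ t))) := by
  induction t generalizing pre with
  | nil => simp
  | cons h t ih =>
    have hflat1 : pre.flatMap (fun line => line.map (fun wt => wt.1)) ++ h.map (fun wt => wt.1)
        = (pre ++ [h]).flatMap (fun line => line.map (fun wt => wt.1)) := by simp
    have hflat2 : pre.flatMap (fun line => line.map (fun wt => wt.2)) ++ h.map (fun wt => wt.2)
        = (pre ++ [h]).flatMap (fun line => line.map (fun wt => wt.2)) := by simp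
    have hoffs : (List.range (pre.length + 1)).map (wtsOff pre)
          ++ [PySem.List.len (pre.flatMap (fun line => line.map (fun wt => wt.1)) ++ h.map (fun wt => wt.1))]
        = (List.range ((pre ++ [h]).length + 1)).map (wtsOff (pre ++ [h])) := by
      have hlen : (pre ++ [h]).length + 1 = (pre.length + 1) + 1 := by simp
      conv_rhs => rw [hlen, List.range_succ, List.map_append]
      congr 1
      · apply List.map_congr_left
        intro k hk
        exact (wtsOff_prefix pre [h] k (by have := List.mem_range.mp hk; omega)).symm
      · simp only [List.map_cons, List.map_nil, PySem.List.len_eq, hflat1]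
        have : (pre ++ [h]).take (pre.length + 1) = pre ++ [h] := by
          apply List.take_of_length_le; simp
        simp [wtsOff, this]
    have := ih (pre ++ [h])
    rw [hflat1] at hoffs
    simp only [List.foldl_cons]
    rw [show wtsStep
          (pre.flatMap (fun line => line.map (fun wt => wt.1)),
           pre.flatMap (fun line => line.map (fun wt => wt.2)),
           (List.range (pre.length + 1)).map (wtsOff pre)) h
        = ((pre ++ [h]).flatMap (fun line => line.map (fun wt => wt.1)),
           (pre ++ [h]).flatMap (fun line => line.map (fun wt => wt.2)),
           (List.range ((pre ++ [h]).length + 1)).map (wtsOff (pre ++ [h]))) from by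
      simp only [wtsStep, hflat1, hflat2, hoffs]]
    rw [this]
    simp

-- slicing the flat array at consecutive offsets recovers line k's column
theorem wts_slice_eq (data : List (List (String × String))) (f : (String × String) → String)
    (k : Nat) (hk : k < data.length) :
    PySem.List.slice (data.flatMap (fun line => line.map f))
        (some (((data.take k).flatMap (fun line => line.map f)).length : Int))
        (some (((data.take (k + 1)).flatMap (fun line => line.map f)).length : Int))
    = data[k].map f := by
  rw [PySem.List.slice_natCast]
  have hsplit : data.flatMap (fun line => line.map f)
      = (data.take k).flatMap (fun line => line.map f) ++ (data.drop k).flatMap (fun line => line.map f) := by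
    rw [← List.flatMap_append, List.take_append_drop]
  have hdk : data.drop k = data[k] :: data.drop (k + 1) := List.drop_eq_getElem_cons hk
  have htk : data.take (k + 1) = data.take k ++ [data[k]] := by
    rw [List.take_add_one]
    simp [List.getElem?_eq_getElem hk]
  rw [hsplit, List.drop_left, htk, List.flatMap_append, hdk]
  simp only [List.flatMap_cons, List.flatMap_nil, List.append_nil, List.length_append]
  rw [Nat.add_sub_cancel_left]
  exact List.take_left' rfl

-- the word and tag column lengths of any prefix agree
theorem wts_off_snd (data : List (List (String × String))) (k : Nat) :
    (((data.take k).flatMap (fun line => line.map (fun wt => wt.2))).length : Int)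
      = wtsOff data k := by
  simp [wtsOff]

-- looking up offset i in the offset table
theorem wts_getD_off (data : List (List (String × String))) (i : Nat) (hi : i ≤ data.length) :
    PySem.List.pyGetD ((List.range (data.length + 1)).map (wtsOff data)) ((i : Int)) 0
      = wtsOff data i := by
  rw [PySem.List.pyGetD_natCast]
  rw [List.getD_eq_getElem _ _ (by simp; omega)]
  simp

-- ===== VERDICT (by name: the statement is the Claim_ definition above) =====
theorem word_to_sequences_spec : Claim_equal_word_to_sequences := by
  intro data _
  unfold Spec_word_to_sequences word_to_sequences word_to_sequences_alt
  rw [wtsA_foldl_eq, wtsStep_eq]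
  have hfold := wtsB_outer_eq data []
  simp only [List.nil_append, List.flatMap_nil, List.length_nil, Nat.zero_add,
    List.range_one, List.map_cons, List.map_nil] at hfold
  rw [show wtsOff ([] : List (List (String × String))) 0 = (0 : Int) by simp [wtsOff]] at hfold
  simp only [hfold]
  have hrange : PySem.List.pyRange 0 (PySem.List.len data) 1
      = (List.range data.length).map (fun k : Nat => (k : Int)) := by
    rw [PySem.List.len_eq, PySem.List.pyRange_zero_natCast]
  simp only [List.nil_append, Prod.mk.injEq]
  constructor
  · -- words
    rw [hrange, List.map_map]
    apply List.ext_getElem (by simp)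
    intro i hi hi'
    simp only [List.getElem_map, List.getElem_range, Function.comp]
    have hilt : i < data.length := by simpa using hi
    rw [wts_getD_off data i (by omega)]
    rw [show ((i : Int) + 1) = (((i + 1 : Nat)) : Int) by push_cast; ring]
    rw [wts_getD_off data (i + 1) (by omega)]
    simpa [wtsOff] using (wts_slice_eq data (fun wt => wt.1) i hilt).symm
  · -- tags
    rw [hrange, List.map_map]
    apply List.ext_getElem (by simp)
    intro i hi hi'
    simp only [List.getElem_map, List.getElem_range, Function.comp]
    have hilt : i < data.length := by simpa using hi
    rw [wts_getD_off data i (by omega)]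
    rw [show ((i : Int) + 1) = (((i + 1 : Nat)) : Int) by push_cast; ring]
    rw [wts_getD_off data (i + 1) (by omega)]
    rw [← wts_off_snd data i, ← wts_off_snd data (i + 1)]
    exact (wts_slice_eq data (fun wt => wt.2) i hilt).symm
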